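-- pv_equiv track=rewrite | github.com/Dcom-KHU/2021-summer-dcomding | 1-week1/4/umi0410.py | solution
-- ===== SOURCE A (Python) =====
-- def solution(stones, k):
--     left = min(stones)
--     right = max(stones)
--     # 이진탐색은 left와 right가 대소관계가 유지될 때 까지 진행됨.
--
--     while left <= right:
--         mid = (left + right) // 2
--         is_verified = verify(stones, mid, k)
--         # 더 많은 친구를 넘겨봐
--         if is_verified:
--             left = mid + 1
--         else:
--             right = mid - 1
--     # left가 더 커져버린 경우 right이 우리가 찾는 값이다.
--     # 언제가 우리가 찾는 값이 나오는지 판단하는 게 중요!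
--     return right
--
-- def verify(stones, friend, k):
--     width = 0
--     for stone in stones:
--         if stone < friend:
--             width += 1
--             if width >= k: return False
--         else:
--             width = 0
--     return True
-- ===== SOURCE B (Python) =====
-- def solution(stones, k):
--     # A friend count f is feasible iff every k consecutive stones contain one >= f,
--     # so the answer is the minimum over all length-k windows of the window maximum.
--     if k <= 1:
--         return min(stones)
--     n = len(stones)
--     if k > n:
--         return max(stones)
--     return min(max(stones[i:i + k]) for i in range(n - k + 1))
-- ===== Notes on version B (the rewrite author's own statement) =====
-- stated objective: alternative
-- what changed: Replaces A's binary search over the answer with a repeated feasibility scan by the direct formula: the answer is the minimum over all length-k windows of the window maximum (with min(stones) for k<=1 and max(stones) for k>len(stones)).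
import Mathlib
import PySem

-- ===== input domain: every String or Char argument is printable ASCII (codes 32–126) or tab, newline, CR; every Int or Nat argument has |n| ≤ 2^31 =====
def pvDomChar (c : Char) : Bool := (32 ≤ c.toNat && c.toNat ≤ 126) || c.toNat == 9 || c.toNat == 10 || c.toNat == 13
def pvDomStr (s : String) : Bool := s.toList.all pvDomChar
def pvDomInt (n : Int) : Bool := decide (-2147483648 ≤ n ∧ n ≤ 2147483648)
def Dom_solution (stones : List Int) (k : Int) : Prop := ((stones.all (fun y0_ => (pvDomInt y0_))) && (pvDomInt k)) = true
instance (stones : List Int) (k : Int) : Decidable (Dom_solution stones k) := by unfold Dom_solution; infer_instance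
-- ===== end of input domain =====

-- B replaces A's binary search over the answer value by the direct formula:
-- the answer is the minimum over all length-k windows of the window maximum
-- (min(stones) when k <= 1, max(stones) when k > len(stones)); objective: alternative algorithm.

-- ===== PORT A =====
-- verify(stones, friend, k): for-loop with early return, ported as structural recursion on the list
def verifyGo (friend k : Int) : List Int → Int → Bool
  | [], _ => true
  | stone :: rest, width =>
    if stone < friend then
      if width + 1 ≥ k then false
      else verifyGo friend k rest (width + 1)
    else verifyGo friend k rest 0

def verify (stones : List Int) (friend k : Int) : Bool :=
  verifyGo friend k stones 0

-- the while-loop of solution; mid = (left + right) // 2 (Python floor division)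
def bsearchA (stones : List Int) (k left right : Int) : Int :=
  if h : left ≤ right then
    if verify stones (PySem.Int.floordiv (left + right) 2) k then
      bsearchA stones k (PySem.Int.floordiv (left + right) 2 + 1) right
    else
      bsearchA stones k left (PySem.Int.floordiv (left + right) 2 - 1)
  else right
termination_by (right + 1 - left).toNat
decreasing_by
  · have := PySem.Int.floordiv_two_mid_bounds h
    omega
  · have := PySem.Int.floordiv_two_mid_bounds h
    omega

def solution (stones : List Int) (k : Int) : Int :=
  match PySem.List.min? stones (fun x => x), PySem.List.max? stones (fun x => x) with
  | some left, some right => bsearchA stones k left right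
  | _, _ => 0   -- unreachable under Pre_solution (min/max of [] raise in Python)

-- ===== PORT B =====
def solution_alt (stones : List Int) (k : Int) : Int :=
  if k ≤ 1 then
    (PySem.List.min? stones (fun x => x)).getD 0
  else
    if k > (stones.length : Int) then
      (PySem.List.max? stones (fun x => x)).getD 0
    else
      (PySem.List.min?
        ((PySem.List.pyRange 0 ((stones.length : Int) - k + 1) 1).map
          (fun i =>
            (PySem.List.max? (PySem.List.slice stones (some i) (some (i + k))) (fun x => x)).getD 0))
        (fun x => x)).getD 0

-- ===== PRECONDITION & SPEC =====
-- Pre_ excludes only the empty list, on which Python's min(stones) raises ValueError (in A and in B alike).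
def Pre_solution (stones : List Int) (k : Int) : Prop := stones ≠ []
instance (stones : List Int) (k : Int) : Decidable (Pre_solution stones k) := by unfold Pre_solution; infer_instance
def pvWitness_solution : List Int × Int := ([2, 4, 5, 3, 2, 1, 4, 2, 5, 1], 3)

def Spec_solution (stones : List Int) (k : Int) (out : Int) : Prop := out = solution_alt stones k
instance (stones : List Int) (k : Int) (out : Int) : Decidable (Spec_solution stones k out) := by unfold Spec_solution; infer_instance

-- ===== CLAIM (what is proved, stated in full; the proofs are below) =====
def Claim_equal_solution : Prop := ∀ (stones : List Int) (k : Int), Dom_solution stones k → Pre_solution stones k → Spec_solution stones k (solution stones k)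

-- ===== LEMMAS AND PROOFS =====

-- "some contiguous run of stones all below f has length ≥ k" is the failure condition of verify
def RunsLt (l : List Int) (f k : Int) : Prop :=
  ∀ p q r : List Int, l = p ++ q ++ r → (∀ x ∈ q, x < f) → (q.length : Int) < k

lemma verifyGo_iff (f k : Int) (hk : 1 ≤ k) :
    ∀ (l : List Int) (w : Int), 0 ≤ w → w < k →
      (verifyGo f k l w = true ↔
        ((∀ q r : List Int, l = q ++ r → (∀ x ∈ q, x < f) → w + (q.length : Int) < k) ∧
          RunsLt l f k)) := by
  intro l
  induction l with
  | nil =>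
    intro w hw0 hwk
    simp only [verifyGo]
    constructor
    · intro _
      constructor
      · intro q r hqr _
        have hq : q = [] := by cases q with | nil => rfl | cons a t => simp at hqr
        subst hq; simpa using hwk
      · intro p q r hpqr _
        have hq : q = [] := by
          cases q with
          | nil => rfl
          | cons a t =>
            have hlen := congrArg List.length hpqr
            simp [List.length_append] at hlen
        subst hq; simpa using hk
    · intro _; trivial
  | cons s rest ih =>
    intro w hw0 hwk
    by_cases hs : s < f
    · by_cases hwk1 : w + 1 ≥ k
      · simp only [verifyGo, if_pos hs, if_pos hwk1]
        constructor
        · intro h; exact absurd h (by simp)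
        · rintro ⟨hpref, -⟩
          exfalso
          have h1 := hpref [s] rest rfl (by intro x hx; simp at hx; omega)
          simp at h1; omega
      · have hwk1' : ¬ (w + 1 ≥ k) := hwk1
        simp only [verifyGo, if_pos hs, if_neg hwk1']
        rw [ih (w + 1) (by omega) (by omega)]
        constructor
        · rintro ⟨hpref, hruns⟩
          constructor
          · intro q r hqr hq
            cases q with
            | nil => simpa using hwk
            | cons a t =>
              simp only [List.cons_append, List.cons.injEq] at hqr
              obtain ⟨ha, ht⟩ := hqr
              have h1 := hpref t r ht (fun x hx => hq x (by simp [hx]))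
              simp only [List.length_cons]
              push_cast
              omega
          · intro p q r hpqr hq
            cases p with
            | nil =>
              cases q with
              | nil => simpa using hk
              | cons a t =>
                simp only [List.nil_append, List.cons_append, List.cons.injEq] at hpqr
                obtain ⟨ha, ht⟩ := hpqr
                have h1 := hpref t r ht (fun x hx => hq x (by simp [hx]))
                simp only [List.length_cons]
                push_cast
                omega
            | cons a p' =>
              simp only [List.cons_append, List.cons.injEq] at hpqr
              exact hruns p' q r hpqr.2 hq
        · rintro ⟨hpref, hruns⟩
          constructor
          · intro q r hqr hq
            have h1 := hpref (s :: q) r (by simp [hqr])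
              (by intro x hx; rcases List.mem_cons.mp hx with h | h
                  · subst h; exact hs
                  · exact hq x h)
            simp only [List.length_cons] at h1
            push_cast at h1 ⊢
            omega
          · intro p q r hpqr hq
            exact hruns (s :: p) q r (by simp [hpqr]) hq
    · simp only [verifyGo, if_neg hs]
      rw [ih 0 le_rfl (by omega)]
      constructor
      · rintro ⟨hpref, hruns⟩
        constructor
        · intro q r hqr hq
          cases q with
          | nil => simpa using hwk
          | cons a t =>
            simp only [List.cons_append, List.cons.injEq] at hqr
            exact absurd (hqr.1 ▸ hq a (by simp)) hs
        · intro p q r hpqr hq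
          cases p with
          | nil =>
            cases q with
            | nil => simpa using hk
            | cons a t =>
              simp only [List.nil_append, List.cons_append, List.cons.injEq] at hpqr
              exact absurd (hpqr.1 ▸ hq a (by simp)) hs
          | cons a p' =>
            simp only [List.cons_append, List.cons.injEq] at hpqr
            exact hruns p' q r hpqr.2 hq
      · rintro ⟨hpref, hruns⟩
        constructor
        · intro q r hqr hq
          have h1 := hruns [s] q r (by simp [hqr]) hq
          omega
        · intro p q r hpqr hq
          exact hruns (s :: p) q r (by simp [hpqr]) hq

lemma verify_iff_runs (stones : List Int) (f k : Int) (hk : 1 ≤ k) :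
    verify stones f k = true ↔ RunsLt stones f k := by
  rw [verify, verifyGo_iff f k hk stones 0 le_rfl (by omega)]
  constructor
  · rintro ⟨-, h⟩; exact h
  · intro h
    refine ⟨?_, h⟩
    intro q r hqr hq
    have := h [] q r (by simpa using hqr) hq
    omega

lemma verify_le_one (f k : Int) (hk : k ≤ 1) :
    ∀ l : List Int, (verifyGo f k l 0 = true ↔ ∀ x ∈ l, f ≤ x) := by
  intro l
  induction l with
  | nil => simp [verifyGo]
  | cons s rest ih =>
    by_cases hs : s < f
    · have h1 : (0 : Int) + 1 ≥ k := by omega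
      simp only [verifyGo, if_pos hs, if_pos h1]
      constructor
      · intro h; exact absurd h (by simp)
      · intro h; exact absurd (h s (by simp)) (by omega)
    · simp only [verifyGo, if_neg hs]
      rw [ih]
      constructor
      · intro h x hx
        rcases List.mem_cons.mp hx with h' | h'
        · subst h'; omega
        · exact h x h'
      · intro h x hx; exact h x (by simp [hx])

-- windows view of RunsLt
lemma runs_iff_windows (stones : List Int) (f k : Int) (hk : 1 ≤ k) :
    RunsLt stones f k ↔
      ∀ j : Nat, j + k.toNat ≤ stones.length →
        ∃ x ∈ (stones.drop j).take k.toNat, f ≤ x := by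
  constructor
  · intro h j hj
    by_contra hno
    push_neg at hno
    have hsplit : stones = stones.take j ++ (stones.drop j).take k.toNat ++ (stones.drop j).drop k.toNat := by
      rw [List.append_assoc, List.take_append_drop, List.take_append_drop]
    have hlen : ((stones.drop j).take k.toNat).length = k.toNat := by
      simp [List.length_take, List.length_drop]
      omega
    have h1 := h (stones.take j) ((stones.drop j).take k.toNat) ((stones.drop j).drop k.toNat)
      hsplit (fun x hx => hno x hx)
    rw [hlen] at h1
    omega
  · intro h p q r hpqr hq
    by_contra hlong
    push_neg at hlong
    have hkq : k.toNat ≤ q.length := by omega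
    have hj : p.length + k.toNat ≤ stones.length := by
      subst hpqr; simp [List.length_append]; omega
    obtain ⟨x, hx, hfx⟩ := h p.length hj
    have hdrop : stones.drop p.length = q ++ r := by
      subst hpqr
      rw [List.append_assoc, List.drop_left]
    have htake : (stones.drop p.length).take k.toNat = q.take k.toNat := by
      rw [hdrop, List.take_append_of_le_length hkq]
    rw [htake] at hx
    exact absurd hfx (not_le.mpr (hq x (List.mem_of_mem_take hx)))

-- binary search hits the threshold of a monotone predicate
lemma bsearch_threshold (stones : List Int) (k T : Int)
    (hch : ∀ f, verify stones f k = true ↔ f ≤ T) :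
    ∀ left right, left ≤ T + 1 → T ≤ right → bsearchA stones k left right = T := by
  have H : ∀ fuel : Nat, ∀ left right : Int, (right + 1 - left).toNat ≤ fuel →
      left ≤ T + 1 → T ≤ right → bsearchA stones k left right = T := by
    intro fuel
    induction fuel with
    | zero =>
      intro l r hfuel h1 h2
      rw [bsearchA, dif_neg (by omega : ¬ l ≤ r)]
      omega
    | succ n ih =>
      intro l r hfuel h1 h2
      by_cases hlr : l ≤ r
      · rw [bsearchA, dif_pos hlr]
        have hmid := PySem.Int.floordiv_two_mid_bounds hlr
        by_cases hv : verify stones (PySem.Int.floordiv (l + r) 2) k = true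
        · rw [if_pos hv]
          have hT : PySem.Int.floordiv (l + r) 2 ≤ T := (hch _).mp hv
          exact ih _ _ (by omega) (by omega) h2
        · rw [if_neg hv]
          have hT : ¬ (PySem.Int.floordiv (l + r) 2 ≤ T) := fun hle => hv ((hch _).mpr hle)
          exact ih _ _ (by omega) h1 (by omega)
      · rw [bsearchA, dif_neg hlr]
        omega
  intro l r h1 h2
  exact H (r + 1 - l).toNat l r le_rfl h1 h2

lemma bsearch_all_true (stones : List Int) (k : Int)
    (hall : ∀ f, verify stones f k = true) :
    ∀ left right, bsearchA stones k left right = right := by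
  have H : ∀ fuel : Nat, ∀ left right : Int, (right + 1 - left).toNat ≤ fuel →
      bsearchA stones k left right = right := by
    intro fuel
    induction fuel with
    | zero =>
      intro l r hfuel
      rw [bsearchA, dif_neg (by omega : ¬ l ≤ r)]
    | succ n ih =>
      intro l r hfuel
      by_cases hlr : l ≤ r
      · rw [bsearchA, dif_pos hlr, if_pos (hall _)]
        have hmid := PySem.Int.floordiv_two_mid_bounds hlr
        exact ih _ _ (by omega)
      · rw [bsearchA, dif_neg hlr]
  intro l r
  exact H (r + 1 - l).toNat l r le_rfl

-- ===== VERDICT (by name: the statement is the Claim_ definition above) =====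
theorem solution_spec : Claim_equal_solution := by
  intro stones k _hdom hpre
  show solution stones k = solution_alt stones k
  obtain ⟨lo, hlo⟩ : ∃ m, PySem.List.min? stones (fun x => x) = some m := by
    cases h : PySem.List.min? stones (fun x => x) with
    | none => exact absurd (Iff.mp (PySem.List.min?_eq_none_iff _ _) h) hpre
    | some m => exact ⟨m, rfl⟩
  obtain ⟨hi, hhi⟩ : ∃ m, PySem.List.max? stones (fun x => x) = some m := by
    cases h : PySem.List.max? stones (fun x => x) with
    | none => exact absurd (Iff.mp (PySem.List.max?_eq_none_iff _ _) h) hpre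
    | some m => exact ⟨m, rfl⟩
  have hlomem := PySem.List.min?_mem hlo
  have hlomin := PySem.List.min?_isMin hlo
  have hhimax := PySem.List.max?_isMax hhi
  have hsol : solution stones k = bsearchA stones k lo hi := by
    unfold solution; rw [hlo, hhi]
  by_cases hk1 : k ≤ 1
  · -- B's first branch: min(stones)
    have hch : ∀ f, verify stones f k = true ↔ f ≤ lo := by
      intro f
      rw [verify, verify_le_one f k hk1 stones]
      constructor
      · intro h; exact h lo hlomem
      · intro h x hx; exact le_trans h (hlomin x hx)
    rw [hsol, bsearch_threshold stones k lo hch lo hi (by omega) (hhimax lo hlomem)]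
    unfold solution_alt
    rw [if_pos hk1, hlo]
    rfl
  · by_cases hkn : k > (stones.length : Int)
    · -- B's second branch: max(stones); verify is identically true
      have hall : ∀ f, verify stones f k = true := by
        intro f
        rw [verify_iff_runs stones f k (by omega)]
        intro p q r hpqr hq
        have hlen := congrArg List.length hpqr
        simp [List.length_append] at hlen
        omega
      rw [hsol, bsearch_all_true stones k hall lo hi]
      unfold solution_alt
      rw [if_neg hk1, if_pos hkn, hhi]
      rfl
    · -- main case: 1 < k ≤ len(stones)
      push_neg at hkn
      have hk1' : (1 : Int) ≤ k := by omega
      set n : Int := (stones.length : Int) with hn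
      set vals := (PySem.List.pyRange 0 (n - k + 1) 1).map
        (fun i => (PySem.List.max? (PySem.List.slice stones (some i) (some (i + k))) (fun x => x)).getD 0) with hvals
      have hslice : ∀ i : Int, 0 ≤ i → i < n - k + 1 →
          PySem.List.slice stones (some i) (some (i + k)) = (stones.drop i.toNat).take k.toNat := by
        intro i h0 h1
        rw [PySem.List.slice_toNat stones h0 (show (0:Int) ≤ i + k by omega)]
        congr 1
        omega
      have hwin : ∀ i : Int, 0 ≤ i → i < n - k + 1 →
          ∃ M, PySem.List.max? (PySem.List.slice stones (some i) (some (i + k))) (fun x => x) = some M := by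
        intro i h0 h1
        rw [hslice i h0 h1]
        cases hM : PySem.List.max? ((stones.drop i.toNat).take k.toNat) (fun x => x) with
        | none =>
          exfalso
          have hnil := Iff.mp (PySem.List.max?_eq_none_iff _ _) hM
          have hlen := congrArg List.length hnil
          simp [List.length_take, List.length_drop] at hlen
          omega
        | some M => exact ⟨M, rfl⟩
      have hvalsne : vals ≠ [] := by
        apply List.ne_nil_of_length_pos
        rw [hvals]
        simp [PySem.List.length_pyRange_one]
        omega
      obtain ⟨T, hTsome⟩ : ∃ m, PySem.List.min? vals (fun x => x) = some m := by
        cases h : PySem.List.min? vals (fun x => x) with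
        | none => exact absurd (Iff.mp (PySem.List.min?_eq_none_iff _ _) h) hvalsne
        | some m => exact ⟨m, rfl⟩
      have hTmem := PySem.List.min?_mem hTsome
      have hTmin := PySem.List.min?_isMin hTsome
      have hTstones : T ∈ stones := by
        obtain ⟨i, hi, hTi⟩ := List.mem_map.mp hTmem
        obtain ⟨hi0, hi1⟩ := PySem.List.mem_pyRange_one.mp hi
        obtain ⟨M, hM⟩ := hwin i hi0 hi1
        have hMmem := PySem.List.max?_mem hM
        rw [hslice i hi0 hi1] at hMmem
        have hMs : M ∈ stones := List.mem_of_mem_drop (List.mem_of_mem_take hMmem)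
        rw [hM] at hTi
        simp at hTi
        rwa [← hTi]
      have hch : ∀ f, verify stones f k = true ↔ f ≤ T := by
        intro f
        rw [verify_iff_runs stones f k hk1', runs_iff_windows stones f k hk1']
        constructor
        · intro h
          obtain ⟨i, hi, hTi⟩ := List.mem_map.mp hTmem
          obtain ⟨hi0, hi1⟩ := PySem.List.mem_pyRange_one.mp hi
          obtain ⟨M, hM⟩ := hwin i hi0 hi1
          rw [hM] at hTi
          simp at hTi
          obtain ⟨x, hx, hfx⟩ := h i.toNat (by omega)
          have hxM := PySem.List.max?_isMax hM x (by rw [hslice i hi0 hi1]; exact hx)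
          simp at hxM
          omega
        · intro hfT j hj
          have h0 : (0 : Int) ≤ (j : Int) := by omega
          have h1 : ((j : Int)) < n - k + 1 := by omega
          obtain ⟨M, hM⟩ := hwin (j : Int) h0 h1
          have hMv : M ∈ vals := by
            rw [hvals]
            refine List.mem_map.mpr ⟨(j : Int), PySem.List.mem_pyRange_one.mpr ⟨h0, h1⟩, ?_⟩
            rw [hM]
            rfl
          have hTM := hTmin M hMv
          simp at hTM
          have hMmem := PySem.List.max?_mem hM
          rw [hslice _ h0 h1] at hMmem
          refine ⟨M, ?_, le_trans hfT hTM⟩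
          simpa using hMmem
      rw [hsol, bsearch_threshold stones k T hch lo hi
        (by have := hlomin T hTstones; simp at this; omega) (by have := hhimax T hTstones; simpa using this)]
      unfold solution_alt
      rw [if_neg hk1, if_neg (by omega : ¬ k > (stones.length : Int))]
      rw [← hn, ← hvals, hTsome]
      rfl
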